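-- pv_equiv track=rewrite | github.com/0417taehyun/Algorithm | LeetCode/Python/1_Easy/1342.py | bitwise_solution
-- ===== SOURCE A (Python) =====
-- def bitwise_solution(num: int) -> int:
--     answer: int = 0
--     while num > 0:
--         if (num & 1) == 0:
--             num >>= 1
--         else:
--             num -= 1
--         answer += 1
--     return answer
-- ===== SOURCE B (Python) =====
-- def bitwise_solution(num: int) -> int:
--     if num <= 0:
--         return 0
--     return num.bit_length() + num.bit_count() - 1
-- ===== Notes on version B (the rewrite author's own statement) =====
-- stated objective: idiomatic
-- what changed: Replaced the halve/decrement while-loop by a closed-form answer read off the bit structure: bit_length plus popcount minus one for positive input, with an early return for non-positive input where the loop never runs.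
import Mathlib
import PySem

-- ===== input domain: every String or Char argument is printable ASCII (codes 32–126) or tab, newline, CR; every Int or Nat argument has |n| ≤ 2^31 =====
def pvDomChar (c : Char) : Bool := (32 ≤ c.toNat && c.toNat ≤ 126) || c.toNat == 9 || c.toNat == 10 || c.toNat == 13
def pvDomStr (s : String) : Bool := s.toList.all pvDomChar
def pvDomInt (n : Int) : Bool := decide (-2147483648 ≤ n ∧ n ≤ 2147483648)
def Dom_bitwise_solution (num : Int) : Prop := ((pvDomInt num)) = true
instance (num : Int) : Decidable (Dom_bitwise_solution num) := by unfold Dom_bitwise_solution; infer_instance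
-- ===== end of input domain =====

-- B replaces A's halve/decrement loop by the closed form bit_length + popcount - 1 (guarded at num ≤ 0).

-- ===== PORT A =====
-- the while-loop of A, state (num, answer)
def bitwise_solution_loop (num answer : Int) : Int :=
  if h : num > 0 then
    if PySem.Int.band num 1 = 0 then
      bitwise_solution_loop (num >>> (1:Nat)) (answer + 1)
    else
      bitwise_solution_loop (num - 1) (answer + 1)
  else answer
termination_by num.toNat
decreasing_by
  · have : num >>> (1:Nat) = num / 2 := by
      rw [Int.shiftRight_eq_div_pow]; norm_num
    omega
  · omega

def bitwise_solution (num : Int) : Int := bitwise_solution_loop num 0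

-- ===== PORT B =====
def bitwise_solution_alt (num : Int) : Int :=
  if num ≤ 0 then 0
  else (PySem.Int.bitLength num : Int) + (PySem.Int.bitCount num : Int) - 1

-- ===== PRECONDITION & SPEC =====
def Spec_bitwise_solution (num : Int) (out : Int) : Prop := out = bitwise_solution_alt num
instance (num : Int) (out : Int) : Decidable (Spec_bitwise_solution num out) := by unfold Spec_bitwise_solution; infer_instance

-- ===== CLAIM (what is proved, stated in full; the proofs are below) =====
def Claim_equal_bitwise_solution : Prop := ∀ (num : Int), Dom_bitwise_solution num → Spec_bitwise_solution num (bitwise_solution num)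

-- ===== LEMMAS AND PROOFS =====

-- closed form recurrences of B, in Nat-cast shape
theorem alt_even (n : Nat) (h0 : 0 < n) (he : n % 2 = 0) :
    bitwise_solution_alt (n : Int) = bitwise_solution_alt ((n / 2 : Nat) : Int) + 1 := by
  have h2 : 0 < n / 2 := by omega
  rw [bitwise_solution_alt, bitwise_solution_alt,
    if_neg (by exact_mod_cast by omega), if_neg (by exact_mod_cast by omega),
    PySem.Int.bitLength_natCast h0, PySem.Int.bitCount_natCast h0, he]
  push_cast
  ring

theorem alt_odd (n : Nat) (h0 : 0 < n) (ho : n % 2 = 1) :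
    bitwise_solution_alt (n : Int) = bitwise_solution_alt ((n - 1 : Nat) : Int) + 1 := by
  by_cases h1 : n = 1
  · subst h1; decide
  · have h3 : 3 ≤ n := by omega
    have hm0 : 0 < n - 1 := by omega
    rw [bitwise_solution_alt, bitwise_solution_alt,
      if_neg (by exact_mod_cast by omega), if_neg (by exact_mod_cast by omega),
      PySem.Int.bitLength_natCast h0, PySem.Int.bitCount_natCast h0,
      PySem.Int.bitLength_natCast hm0, PySem.Int.bitCount_natCast hm0]
    have hd : (n - 1) / 2 = n / 2 := by omega
    have hm : (n - 1) % 2 = 0 := by omega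
    rw [hd, hm, ho]
    push_cast
    ring

theorem loop_closed_form (n : Nat) : ∀ (answer : Int),
    bitwise_solution_loop (n : Int) answer = answer + bitwise_solution_alt (n : Int) := by
  induction n using Nat.strong_induction_on with
  | _ n ih =>
    intro answer
    rw [bitwise_solution_loop]
    by_cases h : (n : Int) > 0
    · have h0 : 0 < n := by exact_mod_cast h
      rw [dif_pos h]
      have hband : PySem.Int.band (n : Int) 1 = ((n &&& 1 : Nat) : Int) := by
        exact_mod_cast PySem.Int.band_natCast n 1
      by_cases he : n % 2 = 0
      · rw [if_pos (by rw [hband, Nat.and_one_is_mod, he]; rfl)]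
        have hs : (n : Int) >>> (1:Nat) = ((n / 2 : Nat) : Int) := by
          rw [Int.shiftRight_eq_div_pow]
          norm_num
        rw [hs, ih (n / 2) (by omega), alt_even n h0 he]
        ring
      · have ho : n % 2 = 1 := by omega
        rw [if_neg (by rw [hband, Nat.and_one_is_mod, ho]; decide)]
        have hs : (n : Int) - 1 = ((n - 1 : Nat) : Int) := by omega
        rw [hs, ih (n - 1) (by omega), alt_odd n h0 ho]
        ring
    · rw [dif_neg h, bitwise_solution_alt, if_pos (by omega)]
      ring

-- ===== VERDICT (by name: the statement is the Claim_ definition above) =====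
theorem bitwise_solution_spec : Claim_equal_bitwise_solution := by
  intro num _
  unfold Spec_bitwise_solution bitwise_solution
  by_cases h : num ≤ 0
  · rw [bitwise_solution_loop, dif_neg (by omega), bitwise_solution_alt, if_pos h]
  · have hn : num = (num.toNat : Int) := by omega
    rw [hn, loop_closed_form]
    ring
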